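-- pv_equiv track=rewrite | github.com/Vishall302/Tally-Export | exclude_groups_ledgers.py | collect_descendants
-- ===== SOURCE A (Python) =====
-- def collect_descendants(pairs: list[tuple[str, str]], root: str) -> tuple[set[str], list[list[str]]]:
--     """Breadth-first expansion: all group names reachable under root, plus per-level lists."""
--     children_by_parent: dict[str, set[str]] = {}
--     for name, parent in pairs:
--         children_by_parent.setdefault(parent, set()).add(name)
--
--     all_under: set[str] = set()
--     frontier: set[str] = {root}
--     levels: list[list[str]] = []
--
--     while True:
--         # Direct children of any name in the current frontier.
--         next_level: list[str] = []
--         for p in frontier: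
--             for child in children_by_parent.get(p, ()):
--                 if child not in all_under:
--                     next_level.append(child)
--         if not next_level:
--             break
--         next_level = sorted(set(next_level))
--         levels.append(next_level)
--         all_under.update(next_level)
--         frontier = set(next_level)
--
--     return all_under, levels
-- ===== SOURCE B (Python) =====
-- def collect_descendants(pairs: list[tuple[str, str]], root: str) -> tuple[set[str], list[list[str]]]:
--     """Saturation over an inverse (child -> parents) index: a name joins the next
--     level as soon as one of its parents is already collected (or is the root);
--     levels come out sorted for free by filtering one pre-sorted name list."""
--     parents_of: dict[str, set[str]] = {}
--     for name, parent in pairs: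
--         parents_of.setdefault(name, set()).add(parent)
--
--     names = sorted(parents_of)  # every name that has a parent, ascending
--     seen: set[str] = set()
--     levels: list[list[str]] = []
--
--     while True:
--         reachers = seen | {root}
--         batch = [c for c in names
--                  if c not in seen and not parents_of[c].isdisjoint(reachers)]
--         if not batch:
--             break
--         levels.append(batch)
--         seen.update(batch)
--
--     return seen, levels
-- ===== Notes on version B (the rewrite author's own statement) =====
-- stated objective: alternative
-- what changed: B replaces A's forward frontier-set BFS (parent->children dict, per-round sorted(set(next_level))) by saturation over an inverse child->parents index: each round it filters one pre-sorted list of all child names for names having a parent in seen|{root}, so levels come out sorted and duplicate-free with no frontier variable and no per-level set/sort.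
import Mathlib
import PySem

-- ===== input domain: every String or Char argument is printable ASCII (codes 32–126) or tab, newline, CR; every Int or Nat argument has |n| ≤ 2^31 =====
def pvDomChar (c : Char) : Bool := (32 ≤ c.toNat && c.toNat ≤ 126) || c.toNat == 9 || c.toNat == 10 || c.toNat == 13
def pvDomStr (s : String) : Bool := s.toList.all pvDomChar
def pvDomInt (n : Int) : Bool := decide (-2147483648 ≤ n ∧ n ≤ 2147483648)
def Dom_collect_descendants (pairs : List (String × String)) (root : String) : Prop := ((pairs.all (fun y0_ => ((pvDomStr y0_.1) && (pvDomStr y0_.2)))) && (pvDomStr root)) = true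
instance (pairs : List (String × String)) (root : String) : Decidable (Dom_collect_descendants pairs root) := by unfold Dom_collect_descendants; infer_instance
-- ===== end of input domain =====

-- B replaces A's forward frontier-set BFS by saturation over an inverse child→parents
-- index filtering one pre-sorted name list per round (objective: alternative, same result).

-- ===== PORT A =====
-- children_by_parent: for name, parent in pairs: setdefault(parent, set()).add(name)
def pvAdjA (pairs : List (String × String)) : PySem.Dict String (PySem.Set String) :=
  pairs.foldl (fun d np => d.insert np.2 (PySem.Set.add (d.getD np.2 PySem.Set.empty) np.1))
    PySem.Dict.empty

-- the body of A's 'for p in frontier: for child in …: if child not in all_under: append'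
-- (frontier is a Python set consumed only through sorted(set(next_level)), so list order is harmless)
def pvNextLevel (adj : PySem.Dict String (PySem.Set String))
    (allUnder frontier : PySem.Set String) : List String :=
  frontier.foldl (fun acc p =>
    (adj.getD p PySem.Set.empty).foldl
      (fun acc c => if !PySem.Set.contains allUnder c then acc ++ [c] else acc) acc) []

-- 'while True': fuel pairs.length+1 is exact — every recursing round adds at least one
-- new first component of pairs to all_under, so at most pairs.length rounds recurse.
def pvLoopA (adj : PySem.Dict String (PySem.Set String)) :
    Nat → PySem.Set String → PySem.Set String → List (List String) →
    List String × List (List String)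
  | 0, allUnder, _, levels => (allUnder, levels)
  | fuel+1, allUnder, frontier, levels =>
    let next := pvNextLevel adj allUnder frontier
    if next = [] then (allUnder, levels)
    else
      let nl := PySem.List.sorted (PySem.Set.ofList next) (fun x => x) false
      pvLoopA adj fuel (PySem.Set.update allUnder nl) nl (levels ++ [nl])

def collect_descendants (pairs : List (String × String)) (root : String) :
    List String × List (List String) :=
  pvLoopA (pvAdjA pairs) (pairs.length + 1) PySem.Set.empty (PySem.Set.ofList [root]) []

-- ===== PORT B =====
-- parents_of: for name, parent in pairs: setdefault(name, set()).add(parent)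
def pvParents (pairs : List (String × String)) : PySem.Dict String (PySem.Set String) :=
  pairs.foldl (fun d np => d.insert np.1 (PySem.Set.add (d.getD np.1 PySem.Set.empty) np.2))
    PySem.Dict.empty

-- '[c for c in names if c not in seen and not parents_of[c].isdisjoint(seen | {root})]'
-- (c ∈ names = keys of parents_of, so the total getD is exactly Python's parents_of[c])
def pvBatch (parentsOf : PySem.Dict String (PySem.Set String)) (names : List String)
    (root : String) (seen : PySem.Set String) : List String :=
  let reachers := PySem.Set.union seen [root]
  names.filter (fun c =>
    !PySem.Set.contains seen c &&
    !PySem.Set.isdisjoint (parentsOf.getD c PySem.Set.empty) reachers)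

-- 'while True' with the same exact fuel bound as A's loop
def pvLoopB (parentsOf : PySem.Dict String (PySem.Set String)) (names : List String)
    (root : String) :
    Nat → PySem.Set String → List (List String) → List String × List (List String)
  | 0, seen, levels => (seen, levels)
  | fuel+1, seen, levels =>
    let batch := pvBatch parentsOf names root seen
    if batch = [] then (seen, levels)
    else pvLoopB parentsOf names root fuel (PySem.Set.update seen batch) (levels ++ [batch])

def collect_descendants_alt (pairs : List (String × String)) (root : String) :
    List String × List (List String) :=
  let parentsOf := pvParents pairs
  let names := PySem.List.sorted parentsOf.keys (fun x => x) false
  pvLoopB parentsOf names root (pairs.length + 1) PySem.Set.empty []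

-- ===== PRECONDITION & SPEC =====
def Spec_collect_descendants (pairs : List (String × String)) (root : String) (out : List String × List (List String)) : Prop := out = collect_descendants_alt pairs root
instance (pairs : List (String × String)) (root : String) (out : List String × List (List String)) : Decidable (Spec_collect_descendants pairs root out) := by unfold Spec_collect_descendants; infer_instance

-- ===== CLAIM (what is proved, stated in full; the proofs are below) =====
def Claim_equal_collect_descendants : Prop := ∀ (pairs : List (String × String)) (root : String), Dom_collect_descendants pairs root → Spec_collect_descendants pairs root (collect_descendants pairs root)

-- ===== LEMMAS AND PROOFS =====

lemma pvContains_false (s : PySem.Set String) (x : String) :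
    (PySem.Set.contains s x = false) ↔ x ∉ s := by
  rw [← PySem.Set.contains_iff s x]
  cases PySem.Set.contains s x <;> simp

lemma pvIsdisjoint_false (s t : PySem.Set String) :
    (PySem.Set.isdisjoint s t = false) ↔ ∃ x ∈ s, x ∈ t := by
  have h := PySem.Set.isdisjoint_iff s t
  constructor
  · intro hb
    rw [hb] at h
    simp only [Bool.false_eq_true, false_iff] at h
    rcases not_forall.1 h with ⟨x, hx⟩
    rcases Classical.not_imp.1 hx with ⟨hxs, hxt⟩
    exact ⟨x, hxs, not_not.1 hxt⟩
  · rintro ⟨x, hxs, hxt⟩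
    cases hb : PySem.Set.isdisjoint s t
    · rfl
    · exact absurd hxt (h.1 hb x hxs)

lemma pvEq_of_pairwise_lt {l₁ l₂ : List String}
    (h₁ : l₁.Pairwise (· < ·)) (h₂ : l₂.Pairwise (· < ·))
    (h : ∀ x, x ∈ l₁ ↔ x ∈ l₂) : l₁ = l₂ := by
  have hp : l₁.Perm l₂ := by
    refine (List.perm_ext_iff_of_nodup ?_ ?_).2 h
    · exact h₁.imp (fun hlt => ne_of_lt hlt)
    · exact h₂.imp (fun hlt => ne_of_lt hlt)
  exact List.Perm.eq_of_pairwise (fun a b _ _ hab hba => absurd hba (lt_asymm hab)) h₁ h₂ hp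

lemma pvAdjA_mem_aux (l : List (String × String)) :
    ∀ (d : PySem.Dict String (PySem.Set String)) (p c : String),
      c ∈ (l.foldl (fun d np => d.insert np.2 (PySem.Set.add (d.getD np.2 PySem.Set.empty) np.1)) d).getD p PySem.Set.empty
        ↔ c ∈ d.getD p PySem.Set.empty ∨ (c, p) ∈ l := by
  induction l with
  | nil => intro d p c; simp
  | cons hd tl ih =>
    intro d p c
    rw [List.foldl_cons, ih, PySem.Dict.getD_insert]
    by_cases h : p = hd.2
    · subst h
      simp [PySem.Set.mem_add, Prod.ext_iff]
      tauto
    · rw [if_neg h]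
      simp [Prod.ext_iff]
      tauto

lemma pvAdjA_mem (pairs : List (String × String)) (p c : String) :
    c ∈ (pvAdjA pairs).getD p PySem.Set.empty ↔ (c, p) ∈ pairs := by
  unfold pvAdjA
  rw [pvAdjA_mem_aux]
  have : (PySem.Dict.empty : PySem.Dict String (PySem.Set String)).getD p PySem.Set.empty = PySem.Set.empty := rfl
  rw [this]
  simp [PySem.Set.empty]

lemma pvParents_mem_aux (l : List (String × String)) :
    ∀ (d : PySem.Dict String (PySem.Set String)) (c p : String),
      p ∈ (l.foldl (fun d np => d.insert np.1 (PySem.Set.add (d.getD np.1 PySem.Set.empty) np.2)) d).getD c PySem.Set.empty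
        ↔ p ∈ d.getD c PySem.Set.empty ∨ (c, p) ∈ l := by
  induction l with
  | nil => intro d c p; simp
  | cons hd tl ih =>
    intro d c p
    rw [List.foldl_cons, ih, PySem.Dict.getD_insert]
    by_cases h : c = hd.1
    · subst h
      simp [PySem.Set.mem_add, Prod.ext_iff]
      tauto
    · rw [if_neg h]
      simp [Prod.ext_iff]
      tauto

lemma pvParents_mem (pairs : List (String × String)) (c p : String) :
    p ∈ (pvParents pairs).getD c PySem.Set.empty ↔ (c, p) ∈ pairs := by
  unfold pvParents
  rw [pvParents_mem_aux]
  have : (PySem.Dict.empty : PySem.Dict String (PySem.Set String)).getD c PySem.Set.empty = PySem.Set.empty := rfl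
  rw [this]
  simp [PySem.Set.empty]

lemma pvParents_keys (pairs : List (String × String)) :
    (pvParents pairs).keys = PySem.Set.ofList (pairs.map Prod.fst) := by
  unfold pvParents
  rw [PySem.Dict.keys_foldl_insert_key pairs Prod.fst
    (fun d np => PySem.Set.add (d.getD np.1 PySem.Set.empty) np.2) PySem.Dict.empty]
  rw [PySem.Set.ofList_eq_foldl]
  rfl

lemma pvNames_pairwise (pairs : List (String × String)) :
    (PySem.List.sorted (pvParents pairs).keys (fun x => x) false).Pairwise (· < ·) := by
  rw [pvParents_keys]
  exact PySem.List.sorted_ofList_pairwise_lt _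

lemma pvNames_mem (pairs : List (String × String)) (c : String) :
    c ∈ PySem.List.sorted (pvParents pairs).keys (fun x => x) false ↔ ∃ p, (c, p) ∈ pairs := by
  rw [PySem.List.mem_sorted, pvParents_keys, PySem.Set.mem_ofList]
  constructor
  · intro h
    rcases List.mem_map.1 h with ⟨⟨a, b⟩, hab, h1⟩
    exact ⟨b, by simpa [← h1] using hab⟩
  · rintro ⟨p, hp⟩
    exact List.mem_map.2 ⟨(c, p), hp, rfl⟩

lemma pvNextLevel_eq (adj : PySem.Dict String (PySem.Set String))
    (allUnder frontier : PySem.Set String) :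
    pvNextLevel adj allUnder frontier
      = frontier.flatMap (fun p =>
          (adj.getD p PySem.Set.empty).filter (fun c => !PySem.Set.contains allUnder c)) := by
  unfold pvNextLevel
  have h : (fun (acc : List String) (p : String) =>
      List.foldl (fun acc c => if !PySem.Set.contains allUnder c then acc ++ [c] else acc) acc
        (adj.getD p PySem.Set.empty))
      = fun acc p => acc ++ (adj.getD p PySem.Set.empty).filter (fun c => !PySem.Set.contains allUnder c) := by
    funext acc p
    exact PySem.List.foldl_append_if_eq_filter _ _ _
  rw [h, PySem.List.foldl_append_eq_flatMap]
  simp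

lemma pvNextLevel_mem (adj : PySem.Dict String (PySem.Set String))
    (allUnder frontier : PySem.Set String) (c : String) :
    c ∈ pvNextLevel adj allUnder frontier
      ↔ (∃ p ∈ frontier, c ∈ adj.getD p PySem.Set.empty) ∧ c ∉ allUnder := by
  rw [pvNextLevel_eq]
  simp [List.mem_flatMap, List.mem_filter]
  tauto

lemma pvBatch_mem (pairs : List (String × String)) (root : String)
    (seen : PySem.Set String) (c : String) :
    c ∈ pvBatch (pvParents pairs) (PySem.List.sorted (pvParents pairs).keys (fun x => x) false) root seen
      ↔ c ∉ seen ∧ ∃ p, (c, p) ∈ pairs ∧ (p ∈ seen ∨ p = root) := by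
  unfold pvBatch
  simp only [List.mem_filter, Bool.and_eq_true, Bool.not_eq_true', pvContains_false,
    pvIsdisjoint_false, pvNames_mem]
  constructor
  · rintro ⟨⟨q, hq⟩, hns, p, hp, hpr⟩
    rw [pvParents_mem] at hp
    rcases (PySem.Set.mem_union seen [root] p).1 hpr with h | h
    · exact ⟨hns, p, hp, Or.inl h⟩
    · exact ⟨hns, p, hp, Or.inr (by simpa using h)⟩
  · rintro ⟨hns, p, hp, hpr⟩
    refine ⟨⟨p, hp⟩, hns, p, (pvParents_mem pairs c p).2 hp, ?_⟩
    apply (PySem.Set.mem_union seen [root] p).2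
    rcases hpr with h | h
    · exact Or.inl h
    · exact Or.inr (by simp [h])

lemma pvOfList_eq_nil (xs : List String) : PySem.Set.ofList xs = [] ↔ xs = [] := by
  constructor
  · intro h
    rw [List.eq_nil_iff_forall_not_mem]
    intro x hx
    have := (PySem.Set.mem_ofList xs x).2 hx
    simp [h] at this
  · rintro rfl; rfl

-- the per-round list A sorts equals the batch B filters, under the frontier invariants
lemma pvBatch_eq_sorted (pairs : List (String × String)) (root : String)
    (seen frontier : PySem.Set String)
    (h1 : ∀ p ∈ frontier, p ∈ seen ∨ p = root)
    (h2 : ∀ c p, (p ∈ seen ∨ p = root) → (c, p) ∈ pairs →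
        c ∈ seen ∨ ∃ q ∈ frontier, (c, q) ∈ pairs) :
    pvBatch (pvParents pairs) (PySem.List.sorted (pvParents pairs).keys (fun x => x) false) root seen
      = PySem.List.sorted (PySem.Set.ofList (pvNextLevel (pvAdjA pairs) seen frontier)) (fun x => x) false := by
  apply pvEq_of_pairwise_lt
  · exact List.Pairwise.sublist List.filter_sublist (pvNames_pairwise pairs)
  · exact PySem.List.sorted_ofList_pairwise_lt _
  · intro x
    rw [pvBatch_mem, PySem.List.mem_sorted, PySem.Set.mem_ofList, pvNextLevel_mem]
    constructor
    · rintro ⟨hns, p, hp, hpr⟩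
      rcases h2 x p hpr hp with h | ⟨q, hqf, hcq⟩
      · exact absurd h hns
      · exact ⟨⟨q, hqf, (pvAdjA_mem pairs q x).2 hcq⟩, hns⟩
    · rintro ⟨⟨p, hpf, hadj⟩, hns⟩
      exact ⟨hns, p, (pvAdjA_mem pairs p x).1 hadj, h1 p hpf⟩

lemma pvLoop_eq (pairs : List (String × String)) (root : String) :
    ∀ (fuel : Nat) (seen : PySem.Set String) (levels : List (List String))
      (frontier : PySem.Set String),
      (∀ p ∈ frontier, p ∈ seen ∨ p = root) →
      (∀ c p, (p ∈ seen ∨ p = root) → (c, p) ∈ pairs →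
        c ∈ seen ∨ ∃ q ∈ frontier, (c, q) ∈ pairs) →
      pvLoopA (pvAdjA pairs) fuel seen frontier levels
        = pvLoopB (pvParents pairs)
            (PySem.List.sorted (pvParents pairs).keys (fun x => x) false) root fuel seen levels := by
  intro fuel
  induction fuel with
  | zero => intro seen levels frontier _ _; rfl
  | succ n ih =>
    intro seen levels frontier h1 h2
    have hbatch := pvBatch_eq_sorted pairs root seen frontier h1 h2
    simp only [pvLoopA, pvLoopB]
    rw [hbatch]
    by_cases hnil : pvNextLevel (pvAdjA pairs) seen frontier = []
    · rw [if_pos hnil, if_pos (by rw [PySem.List.sorted_eq_nil_iff, pvOfList_eq_nil]; exact hnil)]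
    · rw [if_neg hnil,
        if_neg (by rw [PySem.List.sorted_eq_nil_iff, pvOfList_eq_nil]; exact hnil)]
      set nl := PySem.List.sorted (PySem.Set.ofList (pvNextLevel (pvAdjA pairs) seen frontier)) (fun x => x) false with hnl
      apply ih
      · intro p hp
        exact Or.inl ((PySem.Set.mem_update seen nl p).2 (Or.inr hp))
      · intro c p hpr hcp
        rcases hpr with hpu | hpr
        · rcases (PySem.Set.mem_update seen nl p).1 hpu with hps | hpn
          · rcases h2 c p (Or.inl hps) hcp with hcs | ⟨q, hqf, hcq⟩
            · exact Or.inl ((PySem.Set.mem_update seen nl c).2 (Or.inl hcs))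
            · by_cases hc : c ∈ seen
              · exact Or.inl ((PySem.Set.mem_update seen nl c).2 (Or.inl hc))
              · refine Or.inl ((PySem.Set.mem_update seen nl c).2 (Or.inr ?_))
                rw [hnl, PySem.List.mem_sorted, PySem.Set.mem_ofList, pvNextLevel_mem]
                exact ⟨⟨q, hqf, (pvAdjA_mem pairs q c).2 hcq⟩, hc⟩
          · exact Or.inr ⟨p, hpn, hcp⟩
        · rcases h2 c p (Or.inr hpr) hcp with hcs | ⟨q, hqf, hcq⟩
          · exact Or.inl ((PySem.Set.mem_update seen nl c).2 (Or.inl hcs))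
          · by_cases hc : c ∈ seen
            · exact Or.inl ((PySem.Set.mem_update seen nl c).2 (Or.inl hc))
            · refine Or.inl ((PySem.Set.mem_update seen nl c).2 (Or.inr ?_))
              rw [hnl, PySem.List.mem_sorted, PySem.Set.mem_ofList, pvNextLevel_mem]
              exact ⟨⟨q, hqf, (pvAdjA_mem pairs q c).2 hcq⟩, hc⟩

-- ===== VERDICT (by name: the statement is the Claim_ definition above) =====
theorem collect_descendants_spec : Claim_equal_collect_descendants := by
  intro pairs root _
  unfold Spec_collect_descendants collect_descendants collect_descendants_alt
  apply pvLoop_eq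
  · intro p hp
    right
    simpa using (PySem.Set.mem_ofList [root] p).1 hp
  · intro c p hpr hcp
    rcases hpr with h | rfl
    · simp [PySem.Set.empty] at h
    · exact Or.inr ⟨p, (PySem.Set.mem_ofList [p] p).2 (by simp), hcp⟩
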